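-- pv_equiv track=rewrite | github.com/mikiAtomMines/Automation | automation/device_models.py | _create_error_msg
-- ===== SOURCE A (Python) =====
-- def _create_error_msg(byte, lst):
--     """
--     Creates an error message based on a status or error byte and a list containing the error messages
--     corresponding to each bit inside the status byte.
--
--     Parameters
--     ----------
--     byte : int
--         status or error byte. Should be 8-bit
--     lst : list
--         Contains the error messages associated with each bit in the status byte. The index corresponds to
--         the message's respective bit.
--
--     Returns
--     -------
--     None
--         if no errors are found (status byte is 0), return None
--     str
--         else, return the error string
--     """
--     if byte == 0:
--         return None
--     final_msg = ''
--     for i in range(8):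
--         if byte & int(2 ** i):
--             final_msg += ' - ' + lst[i] + '\n'
--     return final_msg
-- ===== SOURCE B (Python) =====
-- def _create_error_msg(byte, lst):
--     if byte == 0:
--         return None
--
--     def go(b, i):
--         # recurse over the shifted byte, stopping as soon as no bits remain
--         if b == 0 or i == 8:
--             return ''
--         head = ' - ' + lst[i] + '\n' if b & 1 else ''
--         return head + go(b >> 1, i + 1)
--
--     return go(byte & 0xFF, 0)
-- ===== Notes on version B (the rewrite author's own statement) =====
-- stated objective: alternative
-- what changed: Replaces the fixed for-loop over range(8) with 2**i mask tests and a += accumulator by a recursion that masks the byte once to 8 bits, then repeatedly tests the low bit and shifts right, stopping early when no set bits remain and building the string top-down by concatenation.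
import Mathlib
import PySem

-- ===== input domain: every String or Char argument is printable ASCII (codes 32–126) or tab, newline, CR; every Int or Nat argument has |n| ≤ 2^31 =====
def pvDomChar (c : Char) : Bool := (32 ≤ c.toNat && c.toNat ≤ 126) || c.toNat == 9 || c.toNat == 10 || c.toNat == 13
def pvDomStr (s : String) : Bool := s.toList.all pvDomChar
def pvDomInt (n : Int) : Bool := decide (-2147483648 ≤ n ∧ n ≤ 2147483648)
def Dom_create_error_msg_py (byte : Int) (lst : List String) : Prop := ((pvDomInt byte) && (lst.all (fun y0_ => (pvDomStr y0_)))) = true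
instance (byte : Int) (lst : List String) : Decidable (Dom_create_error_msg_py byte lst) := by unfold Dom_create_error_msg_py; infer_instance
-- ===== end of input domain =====

-- B replaces the range(8) mask-test loop with an early-exiting recursion on the right-shifted
-- masked byte (alternative decomposition; same cost).

-- ===== PORT A =====
-- for i in range(8): if byte & int(2 ** i): final_msg += ' - ' + lst[i] + '\n'
-- lst[i]: i is 0..7 (nonnegative); pyGetD's default is never used inside Pre_ (lst[i] in range).
def create_error_msg_py (byte : Int) (lst : List String) : Option String :=
  if byte = 0 then none
  else
    some ((PySem.List.pyRange 0 8 1).foldl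
      (fun final_msg i =>
        if PySem.Int.band byte (2 ^ i.toNat) ≠ 0 then
          final_msg ++ " - " ++ PySem.List.pyGetD lst i "" ++ "\n"
        else final_msg) "")

-- ===== PORT B =====
-- go(b, i): Python's guard is `b == 0 or i == 8`; `8 ≤ i` is the same test made total
-- (go is only ever called with i ≤ 8).  lst[i]: i is 0..7; default unused inside Pre_.
def goB (lst : List String) (b : Int) (i : Nat) : String :=
  if b = 0 ∨ 8 ≤ i then ""
  else
    (if PySem.Int.band b 1 ≠ 0 then " - " ++ PySem.List.pyGetD lst (i : Int) "" ++ "\n" else "")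
      ++ goB lst (b >>> (1 : Nat)) (i + 1)
termination_by 8 - i
decreasing_by omega

def create_error_msg_py_alt (byte : Int) (lst : List String) : Option String :=
  if byte = 0 then none
  else some (goB lst (PySem.Int.band byte 255) 0)

-- ===== PRECONDITION & SPEC =====
-- Pre_ excludes exactly the inputs where Python's lst[i] raises IndexError: some bit i < 8
-- of byte (two's complement) is set but i is not a valid index of lst.
def Pre_create_error_msg_py (byte : Int) (lst : List String) : Prop :=
  ∀ i : Fin 8, PySem.Int.band byte (2 ^ (i : Nat)) ≠ 0 → (i : Nat) < lst.length
instance (byte : Int) (lst : List String) : Decidable (Pre_create_error_msg_py byte lst) := by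
  unfold Pre_create_error_msg_py; infer_instance
def pvWitness_create_error_msg_py : Int × List String := (5, ["under volt", "over current", "over temp"])

def Spec_create_error_msg_py (byte : Int) (lst : List String) (out : Option String) : Prop := out = create_error_msg_py_alt byte lst
instance (byte : Int) (lst : List String) (out : Option String) : Decidable (Spec_create_error_msg_py byte lst out) := by unfold Spec_create_error_msg_py; infer_instance

-- ===== CLAIM (what is proved, stated in full; the proofs are below) =====
def Claim_equal_create_error_msg_py : Prop := ∀ (byte : Int) (lst : List String), Dom_create_error_msg_py byte lst → Pre_create_error_msg_py byte lst → Spec_create_error_msg_py byte lst (create_error_msg_py byte lst)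

-- ===== LEMMAS AND PROOFS =====

-- concatenation of a list of strings (proof-side normal form both folds are reduced to)
def catS : List String → String
  | [] => ""
  | x :: l => x ++ catS l

theorem catS_replicate (n : Nat) : catS (List.replicate n "") = "" := by
  induction n with
  | zero => rfl
  | succ n ih => simpa [List.replicate_succ, catS] using ih

theorem foldl_if_append (p : Nat → Prop) [DecidablePred p] (s : Nat → String) :
    ∀ (l : List Nat) (a : String),
      l.foldl (fun acc i => if p i then acc ++ s i else acc) a
        = a ++ catS (l.map fun i => if p i then s i else "") := by
  intro l
  induction l with
  | nil => intro a; simp [catS]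
  | cons x l ih =>
    intro a
    by_cases hx : p x <;> simp [hx, catS, ih, String.append_assoc]

-- complement of an 8-bit value flips each of its 8 bits
set_option maxRecDepth 8192 in
theorem testBit_compl8 : ∀ r : Fin 256, ∀ i : Fin 8,
    (255 - r.val).testBit i.val = !(r.val.testBit i.val) := by decide

-- A's per-bit test reads bit i of byte's low 8 bits (two's complement)
theorem band_pow_iff (byte : Int) (i : Nat) (hi : i < 8) :
    PySem.Int.band byte (2 ^ i) ≠ 0 ↔ ((byte % 256).toNat.testBit i = true) := by
  have h2 : ((2 : Int) ^ i) = ((2 ^ i : Nat) : Int) := by push_cast; ring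
  by_cases hb : 0 ≤ byte
  · rw [h2, PySem.Int.band_of_nonneg hb (by positivity), Int.toNat_natCast]
    have hn : (byte % 256).toNat = byte.toNat % 256 := by omega
    rw [hn, show (256 : Nat) = 2 ^ 8 from by norm_num, Nat.testBit_mod_two_pow, Nat.and_two_pow]
    cases hbit : byte.toNat.testBit i <;> simp [hi]
  · have hb : byte < 0 := by omega
    set m : Nat := (-byte - 1).toNat with hmdef
    have hm : byte = -(m : Int) - 1 := by omega
    have hbandval : PySem.Int.band byte ((2 ^ i : Nat) : Int)
        = ((2 ^ i - (2 ^ i &&& m) : Nat) : Int) := by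
      unfold PySem.Int.band
      rw [if_neg (by omega), if_pos (by positivity)]
      rw [Int.toNat_natCast, ← hmdef]
    have hr : m % 256 < 256 := Nat.mod_lt _ (by norm_num)
    have hn : (byte % 256).toNat = 255 - (m % 256) := by omega
    have hmb : (2 ^ i &&& m) = (m.testBit i).toNat * 2 ^ i := by
      rw [Nat.and_comm, Nat.and_two_pow]
    have htb : m.testBit i = (m % 256).testBit i := by
      have h256 : (256 : Nat) = 2 ^ 8 := by norm_num
      rw [h256, Nat.testBit_mod_two_pow]; simp [hi]
    rw [h2, hbandval, hn,
      show (255 - m % 256).testBit i = !((m % 256).testBit i) from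
        testBit_compl8 ⟨m % 256, hr⟩ ⟨i, hi⟩, ← htb, hmb]
    cases hbit : m.testBit i <;> simp

-- masking with 0xFF is reduction mod 256
theorem band_255 (byte : Int) : PySem.Int.band byte 255 = byte % 256 := by
  by_cases hb : 0 ≤ byte
  · rw [show (255 : Int) = ((255 : Nat) : Int) from rfl,
      PySem.Int.band_of_nonneg hb (by norm_num), Int.toNat_natCast,
      show (255 : Nat) = 2 ^ 8 - 1 from rfl, Nat.and_two_pow_sub_one_eq_mod]
    omega
  · have hb : byte < 0 := by omega
    set m : Nat := (-byte - 1).toNat with hmdef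
    have hval : PySem.Int.band byte 255 = ((255 - (255 &&& m) : Nat) : Int) := by
      unfold PySem.Int.band
      rw [if_neg (by omega), if_pos (by norm_num)]
      rw [← hmdef, show Int.toNat 255 = 255 from rfl]
    have h255 : (255 &&& m) = m % 256 := by
      rw [Nat.and_comm, show (255 : Nat) = 2 ^ 8 - 1 from rfl, Nat.and_two_pow_sub_one_eq_mod]
    rw [hval, h255]
    omega

-- goB on a nonnegative value is the concatenation over the remaining bit positions
theorem goB_eq (lst : List String) :
    ∀ (k j : Nat), j = 8 - k → k ≤ 8 → ∀ (m : Nat),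
      goB lst (m : Int) j
        = catS ((List.range k).map
            (fun t => if m.testBit t then " - " ++ lst.getD (j + t) "" ++ "\n" else "")) := by
  intro k
  induction k with
  | zero =>
    intro j hj _ m
    rw [goB]
    simp [hj, catS]
  | succ k ih =>
    intro j hj hk m
    rw [goB]
    by_cases hm : m = 0
    · subst hm
      simp [Nat.zero_testBit, catS_replicate]
    · have hj8 : ¬ (8 ≤ j) := by omega
      rw [if_neg (by simpa [hj8] using hm)]
      have hshift : ((m : Int) >>> (1 : Nat)) = ((m >>> 1 : Nat) : Int) := by
        exact_mod_cast Int.natCast_shiftRight m 1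
      rw [hshift, ih (j + 1) (by omega) (by omega)]
      have hband : PySem.Int.band (m : Int) 1 = ((m &&& 1 : Nat) : Int) := by
        exact_mod_cast PySem.Int.band_natCast m 1
      have hhead : (PySem.Int.band (m : Int) 1 ≠ 0) ↔ m.testBit 0 = true := by
        rw [hband]
        simp [Nat.and_one_is_mod, Nat.testBit_zero]
        omega
      have hget : PySem.List.pyGetD lst (j : Int) "" = lst.getD j "" :=
        PySem.List.pyGetD_natCast lst j ""
      rw [List.range_succ_eq_map, List.map_cons, List.map_map]
      show _ = _ ++ catS _
      congr 1
      · by_cases hb0 : m.testBit 0 = true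
        · rw [if_pos (hhead.mpr hb0), if_pos (by simpa using hb0), hget]
          simp
        · rw [if_neg (fun h => hb0 (hhead.mp h)), if_neg (by simpa using hb0)]
      · apply congrArg
        apply List.map_congr_left
        intro t _
        have h1 : (m >>> 1).testBit t = m.testBit (t + 1) := by
          rw [Nat.shiftRight_one, ← Nat.testBit_succ]
        have h2 : j + 1 + t = j + (t + 1) := by omega
        simp [Function.comp, h1, h2]

-- ===== VERDICT (by name: the statement is the Claim_ definition above) =====
theorem create_error_msg_py_spec : Claim_equal_create_error_msg_py := by
  intro byte lst _ _
  unfold Spec_create_error_msg_py create_error_msg_py create_error_msg_py_alt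
  by_cases h0 : byte = 0
  · simp [h0]
  · rw [if_neg h0, if_neg h0]
    have hn0 : 0 ≤ byte % 256 := Int.emod_nonneg byte (by norm_num)
    set n : Nat := (byte % 256).toNat with hndef
    have hcast : ((n : Int)) = byte % 256 := by omega
    congr 1
    · -- A's fold
      rw [PySem.List.pyRange_one, List.foldl_map]
      simp only [zero_add]
      rw [show (8 - 0 : Int).toNat = 8 from rfl]
      simp only [String.append_assoc]
      rw [foldl_if_append (fun k => PySem.Int.band byte (2 ^ ((k : Int)).toNat) ≠ 0)
            (fun k => " - " ++ (PySem.List.pyGetD lst (k : Int) "" ++ "\n"))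
            (List.range 8) ""]
      have hB : goB lst (PySem.Int.band byte 255) 0
          = catS ((List.range 8).map
              (fun t => if n.testBit t then " - " ++ lst.getD t "" ++ "\n" else "")) := by
        rw [band_255, ← hcast, goB_eq lst 8 0 rfl (by norm_num)]
        simp
      rw [hB]
      show "" ++ _ = _
      rw [show ∀ s : String, "" ++ s = s from fun s => by simp]
      apply congrArg
      apply List.map_congr_left
      intro k hk
      have hk8 : k < 8 := List.mem_range.mp hk
      have ht : (PySem.Int.band byte (2 ^ ((k : Int)).toNat) ≠ 0) ↔ n.testBit k = true := by
        rw [Int.toNat_natCast]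
        exact band_pow_iff byte k hk8
      have hget : PySem.List.pyGetD lst (k : Int) "" = lst.getD k "" :=
        PySem.List.pyGetD_natCast lst k ""
      by_cases hb : n.testBit k = true
      · rw [if_pos (ht.mpr hb), if_pos hb, hget, String.append_assoc]
      · rw [if_neg (fun h => hb (ht.mp h)), if_neg hb]
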